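-- pv_equiv track=rewrite | github.com/TusharGupta2820/-AI-Powered-Task-Management-Agent-using-LLMs-Streamlit- | ai_agent.py | _analyze_with_keywords
-- ===== SOURCE A (Python) =====
-- def _analyze_with_keywords(task_description: str) -> str:
--     """
--     Simple keyword-based priority analysis as fallback
--     """
--     task_lower = task_description.lower()
--
--     urgent_keywords = [
--         "urgent", "asap", "immediately", "emergency", "critical",
--         "today", "now", "deadline", "crucial", "important",
--         "meeting", "due", "expire", "cancel", "call", "response"
--     ]
--
--     # Check for urgent keywords
--     for keyword in urgent_keywords:
--         if keyword in task_lower: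
--             return "Urgent"
--
--     # Default to Normal if no urgent indicators
--     return "Normal"
-- ===== SOURCE B (Python) =====
-- def _analyze_with_keywords(task_description: str) -> str:
--     """
--     NFA-style single pass: scan the lowered text once, maintaining the set
--     of partially matched keyword suffixes ("active"); at each character,
--     advance active matches and start new ones, returning "Urgent" as soon
--     as some keyword completes.
--     """
--     keywords = [
--         "urgent", "asap", "immediately", "emergency", "critical",
--         "today", "now", "deadline", "crucial", "important",
--         "meeting", "due", "expire", "cancel", "call", "response",
--     ]
--
--     active = []
--     for ch in task_description.lower():
--         hits = [k for k in active + keywords if k[0] == ch]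
--         if any(len(k) == 1 for k in hits):
--             return "Urgent"
--         active = [k[1:] for k in hits]
--     return "Normal"
-- ===== Notes on version B (the rewrite author's own statement) =====
-- stated objective: alternative
-- what changed: Replaces A's keyword-major loop (one full substring scan of the description per keyword) with a single left-to-right pass that simulates an NFA: it maintains the list of partially matched keyword suffixes and advances/starts matches one character at a time, returning Urgent as soon as any keyword completes.
import Mathlib
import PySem

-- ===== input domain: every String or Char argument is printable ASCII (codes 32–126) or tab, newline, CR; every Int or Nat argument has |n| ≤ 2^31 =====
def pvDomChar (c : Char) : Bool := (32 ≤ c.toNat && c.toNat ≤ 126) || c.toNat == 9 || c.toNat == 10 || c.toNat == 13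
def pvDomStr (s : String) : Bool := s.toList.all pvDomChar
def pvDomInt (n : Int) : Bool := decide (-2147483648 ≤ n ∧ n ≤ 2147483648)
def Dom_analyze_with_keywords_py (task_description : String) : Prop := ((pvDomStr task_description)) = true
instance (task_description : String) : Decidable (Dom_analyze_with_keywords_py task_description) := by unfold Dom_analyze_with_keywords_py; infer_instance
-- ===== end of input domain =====

-- B replaces A's keyword-major loop (one `in` scan per keyword) with a single
-- left-to-right NFA-style pass maintaining the list of partially matched keyword suffixes.


-- ===== PORT A =====
def urgentKeywordsA : List String :=
  ["urgent", "asap", "immediately", "emergency", "critical",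
   "today", "now", "deadline", "crucial", "important",
   "meeting", "due", "expire", "cancel", "call", "response"]

-- the `for keyword in urgent_keywords:` loop with its early `return "Urgent"`
def loopA : List String → String → String
  | [], _ => "Normal"
  | k :: rest, t => if PySem.Str.isIn k t then "Urgent" else loopA rest t

def analyze_with_keywords_py (task_description : String) : String :=
  loopA urgentKeywordsA (PySem.Str.lower task_description)

-- ===== PORT B =====
def kwB : List (List Char) :=
  ["urgent".toList, "asap".toList, "immediately".toList, "emergency".toList, "critical".toList,
   "today".toList, "now".toList, "deadline".toList, "crucial".toList, "important".toList,
   "meeting".toList, "due".toList, "expire".toList, "cancel".toList, "call".toList, "response".toList]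

-- the `for ch in …` pass over the lowered text; `active` is the list of pending keyword suffixes,
-- `hits` the comprehension `[k for k in active + keywords if k[0] == ch]` (head? is exact: every
-- candidate is nonempty, so k[0] never raises), the `any(len(k) == 1 …)` is the early return.
def runB (active : List (List Char)) : List Char → String
  | [] => "Normal"
  | ch :: rest =>
      let hits := (active ++ kwB).filter (fun k => k.head? == some ch)
      if hits.any (fun k => k.length == 1) then "Urgent"
      else runB (hits.map List.tail) rest

def analyze_with_keywords_py_alt (task_description : String) : String :=
  runB [] (PySem.Chars.lower task_description.toList)

-- ===== PRECONDITION & SPEC =====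
def Spec_analyze_with_keywords_py (task_description : String) (out : String) : Prop := out = analyze_with_keywords_py_alt task_description
instance (task_description : String) (out : String) : Decidable (Spec_analyze_with_keywords_py task_description out) := by unfold Spec_analyze_with_keywords_py; infer_instance

-- ===== CLAIM (what is proved, stated in full; the proofs are below) =====
def Claim_equal_analyze_with_keywords_py : Prop := ∀ (task_description : String), Dom_analyze_with_keywords_py task_description → Spec_analyze_with_keywords_py task_description (analyze_with_keywords_py task_description)

-- ===== LEMMAS AND PROOFS =====

-- A's loop returns "Urgent" exactly when some keyword is an infix of the text
theorem loopA_eq (kws : List String) (t : String) :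
    loopA kws t = if ∃ k ∈ kws, k.toList <:+: t.toList then "Urgent" else "Normal" := by
  induction kws with
  | nil => simp [loopA]
  | cons k rest ih =>
    by_cases h : PySem.Str.isIn k t = true
    · have hx : ∃ k' ∈ k :: rest, k'.toList <:+: t.toList :=
        ⟨k, by simp, (PySem.Str.isIn_iff_infix k t).mp h⟩
      simp only [loopA, h, if_true, if_pos hx]
    · have hf : PySem.Str.isIn k t = false := by simpa using h
      have hk : ¬ k.toList <:+: t.toList := fun hc => h ((PySem.Str.isIn_iff_infix k t).mpr hc)
      have hiff : (∃ k' ∈ rest, k'.toList <:+: t.toList) ↔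
          (∃ k' ∈ k :: rest, k'.toList <:+: t.toList) := by
        simp only [List.mem_cons]
        constructor
        · rintro ⟨k', hm, hi⟩; exact ⟨k', Or.inr hm, hi⟩
        · rintro ⟨k', hm, hi⟩
          rcases hm with rfl | hm
          · exact absurd hi hk
          · exact ⟨k', hm, hi⟩
      simp only [loopA, hf, Bool.false_eq_true, if_false, ih]
      exact if_congr hiff rfl rfl

theorem kwB_nonempty : ∀ k ∈ kwB, k ≠ [] := by decide

-- B's pass returns "Urgent" exactly when some pending suffix is a prefix of the
-- remaining text or some keyword is an infix of it (invariant: pending suffixes nonempty)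
theorem runB_eq (cs : List Char) : ∀ (active : List (List Char)), (∀ a ∈ active, a ≠ []) →
    runB active cs =
      if (∃ a ∈ active, a <+: cs) ∨ (∃ k ∈ kwB, k <:+: cs) then "Urgent" else "Normal" := by
  induction cs with
  | nil =>
    intro active hne
    have hcond : ¬ ((∃ a ∈ active, a <+: ([] : List Char)) ∨ (∃ k ∈ kwB, k <:+: ([] : List Char))) := by
      rintro (⟨a, ha, hp⟩ | ⟨k, hk, hi⟩)
      · exact hne a ha (List.prefix_nil.mp hp)
      · exact kwB_nonempty k hk (List.infix_nil.mp hi)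
    simp only [runB]
    rw [if_neg hcond]
  | cons c rest ih =>
    intro active hne
    have hLne : ∀ k ∈ active ++ kwB, k ≠ [] := by
      intro k hk
      rcases List.mem_append.mp hk with h | h
      · exact hne k h
      · exact kwB_nonempty k h
    simp only [runB]
    set hits := (active ++ kwB).filter (fun k => k.head? == some c) with hhits
    have hmem : ∀ k, k ∈ hits ↔ k ∈ active ++ kwB ∧ k.head? = some c := by
      intro k
      simp only [hhits, List.mem_filter, List.mem_append, beq_iff_eq]
    by_cases hany : hits.any (fun k => k.length == 1) = true
    · -- some length-1 hit: it is exactly [c], so the overall condition holds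
      obtain ⟨k, hk, hlen⟩ := List.any_eq_true.mp hany
      obtain ⟨hkL, hkh⟩ := (hmem k).mp hk
      have hk1 : k = [c] := by
        cases k with
        | nil => simp at hkh
        | cons x xs =>
          simp only [List.head?_cons, Option.some.injEq] at hkh
          cases xs with
          | nil => simp [hkh]
          | cons y ys => simp at hlen
      have hpre : k <+: c :: rest := by rw [hk1]; exact ⟨rest, rfl⟩
      have hcond : (∃ a ∈ active, a <+: c :: rest) ∨ (∃ k ∈ kwB, k <:+: c :: rest) := by
        rcases List.mem_append.mp hkL with h | h
        · exact Or.inl ⟨k, h, hpre⟩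
        · exact Or.inr ⟨k, h, hpre.isInfix⟩
      rw [if_pos hany, if_pos hcond]
    · have hanyf : hits.any (fun k => k.length == 1) = false := by simpa using hany
      have hno1 : ∀ k ∈ hits, k ≠ [c] := by
        intro k hk hkc
        exact hany (List.any_eq_true.mpr ⟨k, hk, by simp [hkc]⟩)
      have htne : ∀ t ∈ hits.map List.tail, t ≠ [] := by
        intro t ht
        obtain ⟨k, hk, rfl⟩ := List.mem_map.mp ht
        obtain ⟨hkL, hkh⟩ := (hmem k).mp hk
        cases k with
        | nil => simp at hkh
        | cons x xs =>
          simp only [List.head?_cons, Option.some.injEq] at hkh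
          cases xs with
          | nil => exact absurd (by simp [hkh]) (hno1 _ hk)
          | cons y ys => simp
      rw [if_neg (by simp [hany]), ih _ htne]
      -- the two conditions agree
      have hiff : ((∃ t ∈ hits.map List.tail, t <+: rest) ∨ (∃ k ∈ kwB, k <:+: rest)) ↔
          ((∃ a ∈ active, a <+: c :: rest) ∨ (∃ k ∈ kwB, k <:+: c :: rest)) := by
        constructor
        · rintro (⟨t, ht, hp⟩ | ⟨k, hk, hi⟩)
          · obtain ⟨k, hk, rfl⟩ := List.mem_map.mp ht
            obtain ⟨hkL, hkh⟩ := (hmem k).mp hk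
            cases k with
            | nil => simp at hkh
            | cons x xs =>
              simp only [List.head?_cons, Option.some.injEq] at hkh
              subst hkh
              have hpre : x :: xs <+: x :: rest := List.cons_prefix_cons.mpr ⟨rfl, hp⟩
              rcases List.mem_append.mp hkL with h | h
              · exact Or.inl ⟨x :: xs, h, hpre⟩
              · exact Or.inr ⟨x :: xs, h, hpre.isInfix⟩
          · exact Or.inr ⟨k, hk, List.infix_cons_iff.mpr (Or.inr hi)⟩
        · rintro (⟨a, ha, hp⟩ | ⟨k, hk, hi⟩)
          · cases a with
            | nil => exact absurd rfl (hne _ ha)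
            | cons x xs =>
              obtain ⟨rfl, hp'⟩ := List.cons_prefix_cons.mp hp
              have hm : (x :: xs) ∈ hits :=
                (hmem _).mpr ⟨List.mem_append.mpr (Or.inl ha), rfl⟩
              exact Or.inl ⟨xs, List.mem_map.mpr ⟨x :: xs, hm, rfl⟩, hp'⟩
          · rcases List.infix_cons_iff.mp hi with hp | hi'
            · cases k with
              | nil => exact absurd rfl (kwB_nonempty _ hk)
              | cons x xs =>
                obtain ⟨rfl, hp'⟩ := List.cons_prefix_cons.mp hp
                have hm : (x :: xs) ∈ hits :=
                  (hmem _).mpr ⟨List.mem_append.mpr (Or.inr hk), rfl⟩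
                exact Or.inl ⟨xs, List.mem_map.mpr ⟨x :: xs, hm, rfl⟩, hp'⟩
            · exact Or.inr ⟨k, hk, hi'⟩
      exact if_congr hiff rfl rfl

-- the two keyword lists name the same words
theorem kw_lists_eq : kwB = urgentKeywordsA.map String.toList := by decide

-- ===== VERDICT (by name: the statement is the Claim_ definition above) =====
theorem analyze_with_keywords_py_spec : Claim_equal_analyze_with_keywords_py := by
  intro td _
  unfold Spec_analyze_with_keywords_py analyze_with_keywords_py analyze_with_keywords_py_alt
  rw [loopA_eq, runB_eq _ [] (by simp)]
  have hl : (PySem.Str.lower td).toList = PySem.Chars.lower td.toList := by simp [pysem]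
  rw [kw_lists_eq] at *
  simp [hl, List.mem_map]
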